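-- pv_equiv track=rewrite | github.com/emecercelik/Multi-frame-3D-detection | frustum-pointnets/scripts/get_all_summaries.py | print_row_sepa
-- ===== SOURCE A (Python) =====
-- def print_row_sepa(line_list):
--     line_str=''
--     for ent in line_list:
--         line_str+='|:'
--         for i in range(23):
--             line_str+='-'
--         line_str+=':'
--     line_str+='|'
--     return line_str
-- ===== SOURCE B (Python) =====
-- def print_row_sepa(line_list):
--     return ('|:' + '-' * 23 + ':') * len(line_list) + '|'
-- ===== Notes on version B (the rewrite author's own statement) =====
-- stated objective: simpler
-- what changed: Replaces the nested accumulation loops (outer over entries, inner 23 iterations appending '-') with a closed-form expression: one fixed block string repeated len(line_list) times plus the closing '|'.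
import Mathlib
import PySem

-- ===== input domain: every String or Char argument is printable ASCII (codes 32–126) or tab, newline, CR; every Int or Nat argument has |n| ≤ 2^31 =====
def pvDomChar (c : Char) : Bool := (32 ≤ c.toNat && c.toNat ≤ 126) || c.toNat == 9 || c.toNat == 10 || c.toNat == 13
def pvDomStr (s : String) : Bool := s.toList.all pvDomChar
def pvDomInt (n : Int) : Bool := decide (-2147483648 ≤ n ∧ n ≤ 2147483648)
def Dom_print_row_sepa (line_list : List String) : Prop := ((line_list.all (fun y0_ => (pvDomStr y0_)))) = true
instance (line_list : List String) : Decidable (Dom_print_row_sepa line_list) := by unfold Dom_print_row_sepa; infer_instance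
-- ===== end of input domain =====

-- B replaces A's nested accumulation loops with a closed-form repeated block (objective: simpler).

-- ===== PORT A =====
-- A: outer loop over line_list; inner loop 'for i in range(23)' appending '-' one at a time.
def print_row_sepa (line_list : List String) : String :=
  let line_str :=
    line_list.foldl (fun line_str _ent =>
      let line_str := line_str ++ "|:"
      let line_str := (PySem.List.pyRange 0 23 1).foldl (fun line_str _i => line_str ++ "-") line_str
      line_str ++ ":") ""
  line_str ++ "|"

-- ===== PORT B =====
-- B: ('|:' + '-'*23 + ':') * len(line_list) + '|'
def print_row_sepa_alt (line_list : List String) : String :=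
  String.join (List.replicate line_list.length ("|:" ++ String.ofList (List.replicate 23 '-') ++ ":")) ++ "|"

-- ===== PRECONDITION & SPEC =====
def Spec_print_row_sepa (line_list : List String) (out : String) : Prop := out = print_row_sepa_alt line_list
instance (line_list : List String) (out : String) : Decidable (Spec_print_row_sepa line_list out) := by unfold Spec_print_row_sepa; infer_instance

-- ===== CLAIM (what is proved, stated in full; the proofs are below) =====
def Claim_equal_print_row_sepa : Prop := ∀ (line_list : List String), Dom_print_row_sepa line_list → Spec_print_row_sepa line_list (print_row_sepa line_list)

-- ===== LEMMAS AND PROOFS =====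

-- A's inner loop appends one '-' per element of the range it iterates
theorem inner_loop_toList (L : List Int) (s : String) :
    (L.foldl (fun line_str _i => line_str ++ "-") s).toList
      = s.toList ++ List.replicate L.length '-' := by
  induction L generalizing s with
  | nil => simp
  | cons x xs ih => simp [ih, List.replicate_succ]

-- loop invariant for A's outer fold, on the character level
theorem outer_loop_toList (l : List String) (s : String) :
    (l.foldl (fun line_str _ent =>
        ((PySem.List.pyRange 0 23 1).foldl (fun line_str _i => line_str ++ "-") (line_str ++ "|:")) ++ ":") s).toList
      = s.toList ++ (List.replicate l.length
          ("|:" ++ String.ofList (List.replicate 23 '-') ++ ":").toList).flatten := by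
  induction l generalizing s with
  | nil => simp
  | cons x xs ih =>
      have hlen : (PySem.List.pyRange 0 23 1).length = 23 := by decide
      simp [List.foldl_cons, ih, inner_loop_toList, hlen, List.replicate_succ]

-- ===== VERDICT (by name: the statement is the Claim_ definition above) =====
theorem print_row_sepa_spec : Claim_equal_print_row_sepa := by
  intro l _
  unfold Spec_print_row_sepa print_row_sepa print_row_sepa_alt
  apply String.toList_inj.mp
  simp [outer_loop_toList]
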